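-- pv_equiv track=rewrite | github.com/TruStoryHnsl/concord | server/routers/extensions.py | _is_valid_extension_id
-- ===== SOURCE A (Python) =====
-- def _is_valid_extension_id(ext_id: str) -> bool:
--     """Reverse-domain ids only. Reject anything that could escape a path
--     or smuggle special characters."""
--     if not ext_id:
--         return False
--     if len(ext_id) > 200:
--         return False
--     if any(c in ext_id for c in ("/", "\\", "\x00")):
--         return False
--     if ".." in ext_id:
--         return False
--     parts = ext_id.split(".")
--     if len(parts) < 2:
--         return False
--     for p in parts:
--         if not p:
--             return False
--         if not all(c.isalnum() or c == "-" for c in p):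
--             return False
--     return True
-- ===== SOURCE B (Python) =====
-- def _is_valid_extension_id(ext_id: str) -> bool:
--     """Single left-to-right scan instead of multiple substring/split passes."""
--     if not ext_id:
--         return False
--     if len(ext_id) > 200:
--         return False
--     saw_dot = False
--     seg_nonempty = False
--     for c in ext_id:
--         if c == ".":
--             if not seg_nonempty:
--                 return False
--             saw_dot = True
--             seg_nonempty = False
--         elif c.isalnum() or c == "-":
--             seg_nonempty = True
--         else:
--             return False
--     return seg_nonempty and saw_dot
-- ===== Notes on version B (the rewrite author's own statement) =====
-- stated objective: alternative
-- what changed: Replaces A's several separate passes (three membership scans, a double-dot substring test, and a split into parts followed by a per-part loop) by one left-to-right character scan maintaining saw-dot and segment-nonempty state.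
import Mathlib
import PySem

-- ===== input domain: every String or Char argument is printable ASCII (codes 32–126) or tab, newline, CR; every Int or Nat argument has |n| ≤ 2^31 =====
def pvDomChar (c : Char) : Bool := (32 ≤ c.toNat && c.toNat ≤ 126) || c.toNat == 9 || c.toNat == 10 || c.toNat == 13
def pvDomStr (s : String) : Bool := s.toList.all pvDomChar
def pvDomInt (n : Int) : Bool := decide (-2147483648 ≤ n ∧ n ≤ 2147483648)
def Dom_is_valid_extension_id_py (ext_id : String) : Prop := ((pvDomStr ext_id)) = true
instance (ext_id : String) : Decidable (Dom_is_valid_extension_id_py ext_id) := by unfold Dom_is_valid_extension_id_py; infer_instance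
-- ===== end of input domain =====

-- B replaces A's several passes (membership scans, '..' substring test, split + per-part loop)
-- by a single left-to-right character scan with saw_dot / segment-nonempty state; same results.


-- ===== PORT A =====
-- A's 'for p in parts' loop with its two early returns
def partsLoopA : List (List Char) → Bool
  | [] => true
  | p :: ps =>
    if p.isEmpty then false
    else if !(p.all (fun c => PySem.Chars.isalnum c || c == '-')) then false
    else partsLoopA ps

def is_valid_extension_id_py (ext_id : String) : Bool :=
  let cs := ext_id.toList
  if cs.isEmpty then false
  else if 200 < cs.length then false
  else if ['/', '\\', Char.ofNat 0].any (fun c => PySem.Chars.isIn [c] cs) then false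
  else if PySem.Chars.isIn ['.', '.'] cs then false
  else
    let parts := PySem.Chars.splitOn cs ['.']
    if parts.length < 2 then false
    else partsLoopA parts

-- ===== PORT B =====
-- B's single scan: state = (saw_dot, current segment nonempty); early returns become false
def altScan : List Char → Bool → Bool → Bool
  | [], sawDot, segNE => segNE && sawDot
  | c :: cs, sawDot, segNE =>
    if c == '.' then
      if segNE then altScan cs true false else false
    else if PySem.Chars.isalnum c || c == '-' then altScan cs sawDot true
    else false

def is_valid_extension_id_py_alt (ext_id : String) : Bool :=
  let cs := ext_id.toList
  if cs.isEmpty then false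
  else if 200 < cs.length then false
  else altScan cs false false

-- ===== PRECONDITION & SPEC =====
def Spec_is_valid_extension_id_py (ext_id : String) (out : Bool) : Prop := out = is_valid_extension_id_py_alt ext_id
instance (ext_id : String) (out : Bool) : Decidable (Spec_is_valid_extension_id_py ext_id out) := by unfold Spec_is_valid_extension_id_py; infer_instance

-- ===== CLAIM (what is proved, stated in full; the proofs are below) =====
def Claim_equal_is_valid_extension_id_py : Prop := ∀ (ext_id : String), Dom_is_valid_extension_id_py ext_id → Spec_is_valid_extension_id_py ext_id (is_valid_extension_id_py ext_id)

-- ===== LEMMAS AND PROOFS =====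

-- reference splitter: mySplit pre cs = the '.'-split parts of (pre ++ cs) given that pre holds no '.'
def mySplit : List Char → List Char → List (List Char)
  | pre, [] => [pre]
  | pre, c :: rest => if c == '.' then pre :: mySplit [] rest else mySplit (pre ++ [c]) rest

-- common evaluation of both programs on the part list
def fcheck : Bool → List (List Char) → Bool
  | sd, [] => sd
  | sd, [p] => p.all (fun c => PySem.Chars.isalnum c || c == '-') && (!p.isEmpty && sd)
  | _, p :: ps => p.all (fun c => PySem.Chars.isalnum c || c == '-') && (!p.isEmpty && fcheck true ps)

theorem mySplit_ne_nil (cs pre : List Char) : mySplit pre cs ≠ [] := by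
  induction cs generalizing pre with
  | nil => simp [mySplit]
  | cons c rest ih =>
    simp only [mySplit]
    split
    · simp
    · exact ih _

theorem splitOn_go_eq (fuel : Nat) : ∀ (l cur : List Char), l.length < fuel → ∀ (acc2 : List (List Char)),
    PySem.Chars.splitOn.go ['.'] fuel l cur acc2 = acc2.reverse ++ mySplit cur.reverse l := by
  induction fuel with
  | zero => intro l cur h; exact absurd h (by omega)
  | succ n ih =>
    intro l cur h acc2
    cases l with
    | nil => simp [PySem.Chars.splitOn.go, mySplit]
    | cons c rest =>
      simp only [PySem.Chars.splitOn.go, List.isPrefixOf, Bool.and_true]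
      by_cases hc : c = '.'
      · subst hc
        simp only [beq_self_eq_true, if_true, List.length_cons, List.length_nil,
          Nat.zero_add, List.drop_succ_cons, List.drop_zero]
        rw [ih rest [] (by simpa using Nat.lt_of_succ_lt_succ h) (cur.reverse :: acc2)]
        simp [mySplit]
      · have hne : ¬ ('.' = c) := fun hx => hc hx.symm
        simp only [beq_iff_eq, hne, if_false]
        rw [ih rest (c :: cur) (by simpa using Nat.lt_of_succ_lt_succ h) acc2]
        simp [mySplit, hc]

theorem splitOn_eq_mySplit (cs : List Char) : PySem.Chars.splitOn cs ['.'] = mySplit [] cs := by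
  have := splitOn_go_eq (cs.length + 1) cs [] (by omega) []
  simpa [PySem.Chars.splitOn] using this

-- a bad prefix keeps fcheck false
theorem fcheck_bad (cs : List Char) : ∀ (pre : List Char) (sd : Bool),
    pre.all (fun c => PySem.Chars.isalnum c || c == '-') = false →
    fcheck sd (mySplit pre cs) = false := by
  induction cs with
  | nil => intro pre sd h; simp [mySplit, fcheck, h]
  | cons c rest ih =>
    intro pre sd h
    simp only [mySplit]
    by_cases hc : c = '.'
    · subst hc
      simp only [beq_self_eq_true, if_true]
      obtain ⟨q, ps, hq⟩ := List.exists_cons_of_ne_nil (mySplit_ne_nil rest [])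
      rw [hq]
      simp [fcheck, h]
    · simp only [beq_iff_eq, hc, if_false]
      exact ih (pre ++ [c]) sd (by simp [List.all_append, h])

-- B's scan computes fcheck of the split
theorem altScan_eq_fcheck (cs : List Char) : ∀ (pre : List Char) (sd : Bool),
    pre.all (fun c => PySem.Chars.isalnum c || c == '-') = true →
    altScan cs sd (!pre.isEmpty) = fcheck sd (mySplit pre cs) := by
  induction cs with
  | nil =>
    intro pre sd h
    simp [altScan, mySplit, fcheck, h, Bool.and_comm]
  | cons c rest ih =>
    intro pre sd h
    simp only [altScan, mySplit]
    by_cases hc : c = '.'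
    · subst hc
      simp only [beq_self_eq_true, if_true]
      obtain ⟨q, ps, hq⟩ := List.exists_cons_of_ne_nil (mySplit_ne_nil rest [])
      cases pre with
      | nil => simp [fcheck, hq]
      | cons a pre' =>
        simp only [List.isEmpty_cons, Bool.not_false, if_true]
        have hrec := ih [] true (by simp)
        simp only [List.isEmpty_nil, Bool.not_true] at hrec
        rw [hrec, hq]
        cases ps with
        | nil => simp [fcheck, h]
        | cons q2 ps2 => simp [fcheck, h]
    · simp only [beq_iff_eq, hc, if_false]
      by_cases hg : (PySem.Chars.isalnum c || c == '-') = true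
      · rw [hg]
        simp only [if_true]
        have hrec := ih (pre ++ [c]) sd (by simp [List.all_append, h, hg])
        rw [show (!(pre ++ [c]).isEmpty) = true by simp] at hrec
        exact hrec
      · have hbad : (PySem.Chars.isalnum c || c == '-') = false := Bool.eq_false_iff.mpr hg
        rw [hbad]
        simp only [Bool.false_eq_true, if_false]
        exact (fcheck_bad rest (pre ++ [c]) sd (by simp [List.all_append, hbad])).symm

-- A's per-part loop agrees with fcheck on nonempty part lists
theorem partsLoopA_eq_fcheck : ∀ (ps : List (List Char)), ps ≠ [] → partsLoopA ps = fcheck true ps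
  | [p], _ => by
    have e : partsLoopA [p] =
        (if p.isEmpty then false
         else if !(p.all (fun c => PySem.Chars.isalnum c || c == '-')) then false else true) := rfl
    rw [e]
    cases hp : p.isEmpty <;> cases ha : p.all (fun c => PySem.Chars.isalnum c || c == '-') <;>
      simp [fcheck, hp, ha]
  | p :: q :: rs, _ => by
    have ih := partsLoopA_eq_fcheck (q :: rs) (by simp)
    have e : partsLoopA (p :: q :: rs) =
        (if p.isEmpty then false
         else if !(p.all (fun c => PySem.Chars.isalnum c || c == '-')) then false
         else partsLoopA (q :: rs)) := rfl
    rw [e, ih]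
    cases hp : p.isEmpty <;> cases ha : p.all (fun c => PySem.Chars.isalnum c || c == '-') <;>
      simp [fcheck, hp, ha]

-- A's tail (length guard + per-part loop) also computes fcheck of the split
theorem aTail_eq_fcheck (cs : List Char) :
    (if (mySplit [] cs).length < 2 then false else partsLoopA (mySplit [] cs)) =
      fcheck false (mySplit [] cs) := by
  obtain ⟨p, ps, hp⟩ := List.exists_cons_of_ne_nil (mySplit_ne_nil cs [])
  rw [hp]
  cases ps with
  | nil => simp [fcheck]
  | cons q rs =>
    have hlen : ¬ ((p :: q :: rs).length < 2) := by simp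
    rw [if_neg hlen, partsLoopA_eq_fcheck (p :: q :: rs) (by simp)]
    have e : fcheck true (p :: q :: rs) =
        (p.all (fun c => PySem.Chars.isalnum c || c == '-') && (!p.isEmpty && fcheck true (q :: rs))) := rfl
    have e2 : fcheck false (p :: q :: rs) =
        (p.all (fun c => PySem.Chars.isalnum c || c == '-') && (!p.isEmpty && fcheck true (q :: rs))) := rfl
    rw [e, e2]

-- a character that is neither '.' nor alnum/'-' forces B's scan to false
theorem altScan_badmem (cs : List Char) : ∀ (sd sn : Bool) (c : Char),
    c ∈ cs → (c == '.') = false → (PySem.Chars.isalnum c || c == '-') = false →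
    altScan cs sd sn = false := by
  induction cs with
  | nil => intro _ _ _ h; simp at h
  | cons a rest ih =>
    intro sd sn c hmem hdot hbad
    simp only [altScan]
    rcases List.mem_cons.mp hmem with rfl | hmem2
    · rw [hdot, hbad]
      simp
    · by_cases ha : a = '.'
      · subst ha
        simp only [beq_self_eq_true, if_true]
        cases sn
        · simp
        · simpa using ih true false c hmem2 hdot hbad
      · simp only [beq_iff_eq, ha, if_false]
        by_cases hg : (PySem.Chars.isalnum a || a == '-') = true
        · rw [hg]
          simpa using ih sd true c hmem2 hdot hbad
        · rw [Bool.eq_false_iff.mpr hg]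
          simp
-- a ".." substring forces B's scan to false
theorem altScan_dotdot (cs : List Char) : ∀ (sd sn : Bool),
    ['.', '.'] <:+: cs → altScan cs sd sn = false := by
  induction cs with
  | nil => intro _ _ h; simp at h
  | cons a rest ih =>
    intro sd sn h
    rcases List.infix_cons_iff.mp h with hpre | hinf
    · obtain ⟨rfl, h2⟩ := List.cons_prefix_cons.mp hpre
      obtain ⟨t, rfl⟩ := h2
      cases sn <;> simp [altScan]
    · simp only [altScan]
      by_cases ha : a = '.'
      · subst ha
        simp only [beq_self_eq_true, if_true]
        cases sn
        · simp
        · simpa using ih true false hinf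
      · simp only [beq_iff_eq, ha, if_false]
        by_cases hg : (PySem.Chars.isalnum a || a == '-') = true
        · rw [hg]
          simpa using ih sd true hinf
        · rw [Bool.eq_false_iff.mpr hg]
          simp

theorem main_eq (s : String) : is_valid_extension_id_py s = is_valid_extension_id_py_alt s := by
  unfold is_valid_extension_id_py is_valid_extension_id_py_alt
  set cs := s.toList with hcs
  by_cases h1 : cs.isEmpty
  · simp [h1]
  · simp only [h1, Bool.false_eq_true, if_false]
    by_cases h2 : 200 < cs.length
    · simp [h2]
    · simp only [h2, if_false]
      by_cases h3 : (['/', '\\', Char.ofNat 0].any (fun c => PySem.Chars.isIn [c] cs)) = true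
      · -- a forbidden character is present: both sides are false
        rw [if_pos h3]
        obtain ⟨c0, hc0, hin⟩ := List.any_eq_true.mp h3
        have hmem := ((PySem.Chars.isIn_iff_infix _ _).mp hin).subset (List.mem_cons_self)
        simp only [List.mem_cons, List.not_mem_nil, or_false] at hc0
        have hscan : altScan cs false false = false := by
          rcases hc0 with rfl | rfl | rfl <;>
            exact altScan_badmem cs false false _ hmem (by decide) (by decide)
        rw [hscan]
      · rw [if_neg h3]
        by_cases h4 : PySem.Chars.isIn ['.', '.'] cs = true
        · rw [if_pos h4]
          rw [altScan_dotdot cs false false ((PySem.Chars.isIn_iff_infix _ _).mp h4)]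
        · rw [if_neg h4]
          rw [splitOn_eq_mySplit, aTail_eq_fcheck]
          have hrec := altScan_eq_fcheck cs [] false (by simp)
          simpa using hrec.symm

-- ===== VERDICT (by name: the statement is the Claim_ definition above) =====
theorem is_valid_extension_id_py_spec : Claim_equal_is_valid_extension_id_py := by
  intro s _
  unfold Spec_is_valid_extension_id_py
  exact main_eq s
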